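-- pv_equiv track=rewrite | github.com/dmdsiz/- | series_5/4. divide and conquer.py | polydivisibleExtensions
-- ===== SOURCE A (Python) =====
-- def longestPolydivisiblePrefix(a):
--     count = 0
--     for i in range(len(str(a))):
--         if int(str(a)[:i+1]) % (i+1) != 0:
--             count +=1
--             return int(str(a)[:i])
--     if count == 0:
--         return int(str(a)[:len(str(a))+1])
--
-- def polydivisibleExtensions(a):
--     count = 0
--     answer = longestPolydivisiblePrefix(a)
--     if answer == a:
--         for i in range(10):
--             if (a*10+i) % (len(str(a*10+i))) ==0:
--                 count += 1
--     return(count)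
-- ===== SOURCE B (Python) =====
-- def longestPolydivisiblePrefix(a):
--     count = 0
--     for i in range(len(str(a))):
--         if int(str(a)[:i+1]) % (i+1) != 0:
--             count +=1
--             return int(str(a)[:i])
--     if count == 0:
--         return int(str(a)[:len(str(a))+1])
--
-- def polydivisibleExtensions(a):
--     answer = longestPolydivisiblePrefix(a)
--     if answer != a:
--         return 0
--     # count the multiples of m among the ten candidate extensions in closed
--     # form, no loop: all ten candidates have the same decimal length m.
--     base = a * 10
--     m = len(str(base))
--     return (base + 9) // m - (base - 1) // m
-- ===== Notes on version B (the rewrite author's own statement) =====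
-- stated objective: simpler
-- what changed: The ten-iteration extension loop is replaced by a closed-form difference of floor divisions that counts the multiples of the digit length m among the ten candidate extensions; the polydivisibility gate is kept.
import Mathlib
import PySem

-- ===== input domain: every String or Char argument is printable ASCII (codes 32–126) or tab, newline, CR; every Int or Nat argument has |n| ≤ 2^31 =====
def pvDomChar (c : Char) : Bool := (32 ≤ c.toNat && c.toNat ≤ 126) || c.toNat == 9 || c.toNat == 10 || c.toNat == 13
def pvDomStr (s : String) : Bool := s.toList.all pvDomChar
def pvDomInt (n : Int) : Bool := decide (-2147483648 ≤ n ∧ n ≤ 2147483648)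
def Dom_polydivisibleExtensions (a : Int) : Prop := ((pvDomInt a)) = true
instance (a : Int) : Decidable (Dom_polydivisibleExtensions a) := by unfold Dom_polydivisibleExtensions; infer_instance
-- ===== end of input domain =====

-- B replaces A's ten-iteration extension loop by a closed-form difference of floor divisions
-- that counts the multiples of the digit length among the ten candidates; the polydivisibility
-- gate (helper) is kept unchanged.

-- ===== PORT A =====
-- shared helper: both Pythons contain this exact helper verbatim.
-- returns none exactly where Python raises ValueError (int('-') on negative input).
def lppLoop (cs : List Char) (i : Nat) : Option Int :=
  if i < cs.length then
    match PySem.Int.ofChars? (PySem.List.slice cs none (some ((i : Int) + 1))) with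
    | none => none
    | some v =>
      if PySem.Int.mod v ((i : Int) + 1) ≠ 0 then
        PySem.Int.ofChars? (PySem.List.slice cs none (some (i : Int)))
      else lppLoop cs (i + 1)
  else
    PySem.Int.ofChars? (PySem.List.slice cs none (some ((cs.length : Int) + 1)))
termination_by cs.length - i

def longestPolydivisiblePrefix (a : Int) : Option Int :=
  lppLoop (PySem.Int.toChars a) 0

def polydivisibleExtensions (a : Int) : Int :=
  match longestPolydivisiblePrefix a with
  | none => 0      -- unreachable inside Pre_ (ValueError)
  | some answer =>
    if answer = a then
      (PySem.List.pyRange 0 10).foldl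
        (fun count i =>
          if PySem.Int.mod (a * 10 + i) (PySem.Str.len (PySem.Int.toStr (a * 10 + i))) = 0
          then count + 1 else count) 0
    else 0

-- ===== PORT B =====
def polydivisibleExtensions_alt (a : Int) : Int :=
  match longestPolydivisiblePrefix a with
  | none => 0      -- unreachable inside Pre_ (ValueError)
  | some answer =>
    if answer ≠ a then 0
    else
      let base := a * 10
      let m := PySem.Str.len (PySem.Int.toStr base)
      PySem.Int.floordiv (base + 9) m - PySem.Int.floordiv (base - 1) m

-- ===== PRECONDITION & SPEC =====
-- Pre_ excludes exactly the negative inputs, where both Pythons raise ValueError (int('-')).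
def Pre_polydivisibleExtensions (a : Int) : Prop := 0 ≤ a
instance (a : Int) : Decidable (Pre_polydivisibleExtensions a) := by
  unfold Pre_polydivisibleExtensions; infer_instance

def pvWitness_polydivisibleExtensions : Int := 12

def Spec_polydivisibleExtensions (a : Int) (out : Int) : Prop := out = polydivisibleExtensions_alt a
instance (a : Int) (out : Int) : Decidable (Spec_polydivisibleExtensions a out) := by
  unfold Spec_polydivisibleExtensions; infer_instance

-- ===== CLAIM (what is proved, stated in full; the proofs are below) =====
def Claim_equal_polydivisibleExtensions : Prop := ∀ (a : Int), Dom_polydivisibleExtensions a → Pre_polydivisibleExtensions a → Spec_polydivisibleExtensions a (polydivisibleExtensions a)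

-- ===== LEMMAS AND PROOFS =====

-- number of decimal digits of n (as Python's len(str(n)) for n ≥ 0)
def digCount (n : Nat) : Nat :=
  if n < 10 then 1 else digCount (n / 10) + 1
decreasing_by exact Nat.div_lt_self (by omega) (by omega)

theorem one_le_digCount (n : Nat) : 1 ≤ digCount n := by
  unfold digCount; split <;> omega

theorem toDigitsCore_length10 :
    ∀ (f n : Nat) (l : List Char), n < f →
      (Nat.toDigitsCore 10 f n l).length = digCount n + l.length := by
  intro f
  induction f with
  | zero => intro n l h; omega
  | succ f ih =>
    intro n l h
    rw [Nat.toDigitsCore]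
    by_cases h10 : n / 10 = 0
    · simp only [h10, if_pos]
      have hlt : n < 10 := by omega
      conv_rhs => rw [digCount]
      rw [if_pos hlt]
      simp only [List.length_cons]
      omega
    · rw [if_neg h10]
      have hn : 10 ≤ n := by omega
      have hlt : n / 10 < f := by omega
      rw [ih (n / 10) _ hlt]
      conv_rhs => rw [digCount]
      rw [if_neg (by omega)]
      simp only [List.length_cons]
      omega

theorem len_toChars_nonneg (a : Int) (ha : 0 ≤ a) :
    (PySem.Int.toChars a).length = digCount a.toNat := by
  rw [PySem.Int.toChars, if_neg (by omega)]
  rw [Nat.toDigits]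
  exact toDigitsCore_length10 (a.toNat + 1) a.toNat [] (by omega)

-- all ten extension candidates a*10+i have the same decimal length as a*10
theorem decade_len (a i : Int) (ha : 0 ≤ a) (hi0 : 0 ≤ i) (hi9 : i < 10) :
    digCount ((a * 10 + i).toNat) = digCount ((a * 10).toNat) := by
  by_cases h0 : a = 0
  · subst h0
    rw [digCount, if_pos (by omega), digCount, if_pos (by omega)]
  · have ha1 : 1 ≤ a := by omega
    have h1 : (a * 10 + i).toNat = a.toNat * 10 + i.toNat := by omega
    have h2 : (a * 10).toNat = a.toNat * 10 := by omega
    rw [h1, h2]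
    have e1 : (a.toNat * 10 + i.toNat) / 10 = a.toNat := by omega
    have e2 : a.toNat * 10 / 10 = a.toNat := by omega
    conv_lhs => rw [digCount]
    conv_rhs => rw [digCount]
    rw [if_neg (by omega), if_neg (by omega), e1, e2]

-- one telescoping step: floordiv x m - floordiv (x-1) m counts whether m ∣ x
theorem floordiv_step (m : Int) (hm : 0 < m) (x : Int) :
    PySem.Int.floordiv x m - PySem.Int.floordiv (x - 1) m
      = if PySem.Int.mod x m = 0 then 1 else 0 := by
  rw [PySem.Int.floordiv_eq_ediv_of_pos hm, PySem.Int.floordiv_eq_ediv_of_pos hm,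
      PySem.Int.mod_eq_emod_of_pos hm]
  have hq := Int.mul_ediv_add_emod x m
  have hr0 : 0 ≤ x % m := Int.emod_nonneg x (by omega)
  have hrm : x % m < m := Int.emod_lt_of_pos x hm
  by_cases hz : x % m = 0
  · have key : x - 1 = (m - 1) + (x / m - 1) * m := by
      ring_nf
      ring_nf at hq
      linarith
    have hz0 : (m - 1) / m = 0 := Int.ediv_eq_zero_of_lt (by omega) (by omega)
    rw [if_pos hz, key, Int.add_mul_ediv_right _ _ (show m ≠ 0 by omega), hz0]
    ring
  · have key : x - 1 = (x % m - 1) + (x / m) * m := by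
      ring_nf
      ring_nf at hq
      linarith
    have hz0 : (x % m - 1) / m = 0 := Int.ediv_eq_zero_of_lt (by omega) (by omega)
    rw [if_neg hz, key, Int.add_mul_ediv_right _ _ (show m ≠ 0 by omega), hz0]
    ring

-- the extension-counting loop in closed form
theorem count_loop (m base : Int) (hm : 0 < m) :
    ∀ (k : Nat),
      (PySem.List.pyRange 0 (k : Int)).foldl
        (fun c i => if PySem.Int.mod (base + i) m = 0 then c + 1 else c) 0
      = PySem.Int.floordiv (base + k - 1) m - PySem.Int.floordiv (base - 1) m := by
  intro k
  induction k with
  | zero =>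
    simp [PySem.List.pyRange]
  | succ k ih =>
    have hcast : ((k + 1 : Nat) : Int) = (k : Int) + 1 := by push_cast; ring
    rw [hcast, PySem.List.pyRange_one_succ_right (by positivity), List.foldl_append]
    simp only [List.foldl]
    have hstep := floordiv_step m hm (base + k)
    by_cases hc : PySem.Int.mod (base + (k : Int)) m = 0
    · rw [if_pos hc, ih]
      rw [if_pos hc] at hstep
      have e : base + ((k : Int) + 1) - 1 = base + k := by ring
      rw [e]
      omega
    · rw [if_neg hc, ih]
      rw [if_neg hc] at hstep
      have e : base + ((k : Int) + 1) - 1 = base + k := by ring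
      rw [e]
      omega

-- ===== VERDICT (by name: the statement is the Claim_ definition above) =====
theorem polydivisibleExtensions_spec : Claim_equal_polydivisibleExtensions := by
  intro a _ hpre
  have ha : 0 ≤ a := hpre
  unfold Spec_polydivisibleExtensions polydivisibleExtensions polydivisibleExtensions_alt
  cases h : longestPolydivisiblePrefix a with
  | none => rfl
  | some answer =>
    simp only [ne_eq, ite_not]
    by_cases hans : answer = a
    · rw [if_pos hans, if_pos hans]
      have hbase : (0 : Int) ≤ a * 10 := by omega
      have hm : 0 < PySem.Str.len (PySem.Int.toStr (a * 10)) := by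
        rw [PySem.Str.len_eq, PySem.Int.toList_toStr, len_toChars_nonneg _ hbase]
        have := one_le_digCount ((a * 10).toNat)
        omega
      rw [PySem.List.foldl_congr_mem (PySem.List.pyRange 0 10) _
        (fun c i => if PySem.Int.mod (a * 10 + i) (PySem.Str.len (PySem.Int.toStr (a * 10))) = 0
          then c + 1 else c) 0
        (by
          intro acc x hx
          rw [PySem.List.mem_pyRange_one] at hx
          have hlen : PySem.Str.len (PySem.Int.toStr (a * 10 + x))
              = PySem.Str.len (PySem.Int.toStr (a * 10)) := by
            rw [PySem.Str.len_eq, PySem.Str.len_eq, PySem.Int.toList_toStr,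
              PySem.Int.toList_toStr, len_toChars_nonneg _ (by omega),
              len_toChars_nonneg _ hbase, decade_len a x ha hx.1 hx.2]
          rw [hlen])]
      have hcl := count_loop (PySem.Str.len (PySem.Int.toStr (a * 10))) (a * 10) hm 10
      rw [show ((10 : Nat) : Int) = (10 : Int) by norm_num,
          show a * 10 + 10 - 1 = a * 10 + 9 by ring] at hcl
      exact hcl
    · rw [if_neg hans, if_neg hans]
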